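-- pv_equiv track=rewrite | github.com/stejs0303/Edabit_Challenges | Python/prison_break.py | freed_prisoners
-- ===== SOURCE A (Python) =====
-- def freed_prisoners(prison: list[bool]) -> int:
--     if len(prison) > 0 and prison[0] == 0:
--         return 0
--
--     lf, freed = True, 0
--     for cell in prison:
--         if cell != lf: continue
--         freed += 1
--         lf = not lf
--
--     return freed
-- ===== SOURCE B (Python) =====
-- def freed_prisoners(prison: list[bool]) -> int:
--     if not prison or not prison[0]:
--         return 0
--     return 1 + sum(prison[i] != prison[i - 1] for i in range(1, len(prison)))
-- ===== Notes on version B (the rewrite author's own statement) =====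
-- stated objective: simpler
-- what changed: Replaces the toggling last-freed-flag state machine with counting adjacent value transitions: each maximal run frees exactly one prisoner, so the answer is 1 plus the number of indices where prison[i] != prison[i-1] (0 if empty or first cell locked).
import Mathlib
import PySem

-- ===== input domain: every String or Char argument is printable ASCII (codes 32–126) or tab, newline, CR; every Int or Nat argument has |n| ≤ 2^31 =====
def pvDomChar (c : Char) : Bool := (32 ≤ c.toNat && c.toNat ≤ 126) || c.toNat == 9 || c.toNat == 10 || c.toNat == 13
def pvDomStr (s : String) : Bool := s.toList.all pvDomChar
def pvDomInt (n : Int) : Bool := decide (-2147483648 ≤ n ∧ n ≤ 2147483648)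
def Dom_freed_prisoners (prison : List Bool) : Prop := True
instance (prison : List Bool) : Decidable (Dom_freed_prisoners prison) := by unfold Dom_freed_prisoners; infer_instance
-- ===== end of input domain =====

-- B replaces A's toggling last-freed-flag state machine by counting adjacent transitions (simpler); same return value everywhere.

-- ===== PORT A =====
-- the for-loop over cells with state (lf, freed); 'if cell != lf: continue' skips, else freed += 1, lf flips
def fpLoopA (lf : Bool) (freed : Int) : List Bool → Int
  | [] => freed
  | cell :: rest =>
    if cell ≠ lf then fpLoopA lf freed rest
    else fpLoopA (!lf) (freed + 1) rest

def freed_prisoners (prison : List Bool) : Int :=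
  if prison.length > 0 ∧ PySem.List.pyGet? prison 0 = some false then 0
  else fpLoopA true 0 prison

-- ===== PORT B =====
-- sum over i in range(1, len): prison[i] != prison[i-1], i.e. adjacent-pair transition count
def fpTrans : List Bool → Int
  | [] => 0
  | [_] => 0
  | a :: b :: rest => (if a ≠ b then 1 else 0) + fpTrans (b :: rest)

def freed_prisoners_alt (prison : List Bool) : Int :=
  match prison with
  | [] => 0
  | c :: _ => if c = false then 0 else 1 + fpTrans prison

-- ===== PRECONDITION & SPEC =====
def Spec_freed_prisoners (prison : List Bool) (out : Int) : Prop := out = freed_prisoners_alt prison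
instance (prison : List Bool) (out : Int) : Decidable (Spec_freed_prisoners prison out) := by unfold Spec_freed_prisoners; infer_instance

-- ===== CLAIM (what is proved, stated in full; the proofs are below) =====
def Claim_equal_freed_prisoners : Prop := ∀ (prison : List Bool), Dom_freed_prisoners prison → Spec_freed_prisoners prison (freed_prisoners prison)

-- ===== LEMMAS AND PROOFS =====

-- loop invariant: starting in-phase the loop yields k + 1 + transitions; starting out-of-phase it yields k + transitions
theorem fpLoopA_eq (l : List Bool) : ∀ (c : Bool) (k : Int),
    fpLoopA c k (c :: l) = k + 1 + fpTrans (c :: l) ∧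
    fpLoopA (!c) k (c :: l) = k + fpTrans (c :: l) := by
  induction l with
  | nil =>
    intro c k
    constructor <;> cases c <;> simp [fpLoopA, fpTrans]
  | cons d l ih =>
    intro c k
    constructor
    · show fpLoopA c k (c :: d :: l) = k + 1 + fpTrans (c :: d :: l)
      have h1 : fpLoopA c k (c :: d :: l) = fpLoopA (!c) (k + 1) (d :: l) := by
        cases c <;> simp [fpLoopA]
      rw [h1]
      by_cases hd : d = c
      · subst hd
        have := (ih d (k + 1)).2
        rw [this]
        cases d <;> simp [fpTrans] <;> ring
      · have hdc : d = !c := by cases c <;> cases d <;> simp_all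
        subst hdc
        have := (ih (!c) (k + 1)).1
        rw [this]
        have : fpTrans (c :: (!c) :: l) = 1 + fpTrans ((!c) :: l) := by
          cases c <;> simp [fpTrans]
        rw [this]; ring
    · show fpLoopA (!c) k (c :: d :: l) = k + fpTrans (c :: d :: l)
      have h1 : fpLoopA (!c) k (c :: d :: l) = fpLoopA (!c) k (d :: l) := by
        cases c <;> simp [fpLoopA]
      rw [h1]
      by_cases hd : d = c
      · subst hd
        have := (ih d k).2
        rw [this]
        cases d <;> simp [fpTrans]
      · have hdc : d = !c := by cases c <;> cases d <;> simp_all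
        subst hdc
        have := (ih (!c) k).1
        rw [this]
        have : fpTrans (c :: (!c) :: l) = 1 + fpTrans ((!c) :: l) := by
          cases c <;> simp [fpTrans]
        rw [this]; ring

-- ===== VERDICT (by name: the statement is the Claim_ definition above) =====
theorem freed_prisoners_spec : Claim_equal_freed_prisoners := by
  intro prison _
  unfold Spec_freed_prisoners freed_prisoners freed_prisoners_alt
  match prison with
  | [] => simp [fpLoopA]
  | false :: l => simp [PySem.List.pyGet?, PySem.List.pyIdx?]
  | true :: l =>
    have h := (fpLoopA_eq l true 0).1
    simp [PySem.List.pyGet?, PySem.List.pyIdx?, h]
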